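-- pv_equiv track=rewrite | github.com/MagDenBT/AutoBackupPG | Cleaner.py | __optimize_remove_list
-- ===== SOURCE A (Python) =====
-- def __optimize_remove_list(emptyDirs):
--     emptyDirs = set(emptyDirs)
--     tempColl = emptyDirs.copy()
--     for i, sought in enumerate(emptyDirs):
--         for z, target in enumerate(emptyDirs):
--             if z == i:
--                 continue
--             if target.startswith(sought):
--                 try:
--                     tempColl.remove(target)
--                 except KeyError:
--                     continue
--     return tempColl
-- ===== SOURCE B (Python) =====
-- def __optimize_remove_list(emptyDirs):
--     uniq = set(emptyDirs)
--     return {t for t in uniq if not any(t[:k] in uniq for k in range(len(t)))}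
-- ===== Notes on version B (the rewrite author's own statement) =====
-- stated objective: faster
-- what changed: Replaces A's O(n^2) all-pairs startswith scan (with try/remove) by a single pass that tests each string's proper prefixes for membership in the set via hashing.
import Mathlib
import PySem

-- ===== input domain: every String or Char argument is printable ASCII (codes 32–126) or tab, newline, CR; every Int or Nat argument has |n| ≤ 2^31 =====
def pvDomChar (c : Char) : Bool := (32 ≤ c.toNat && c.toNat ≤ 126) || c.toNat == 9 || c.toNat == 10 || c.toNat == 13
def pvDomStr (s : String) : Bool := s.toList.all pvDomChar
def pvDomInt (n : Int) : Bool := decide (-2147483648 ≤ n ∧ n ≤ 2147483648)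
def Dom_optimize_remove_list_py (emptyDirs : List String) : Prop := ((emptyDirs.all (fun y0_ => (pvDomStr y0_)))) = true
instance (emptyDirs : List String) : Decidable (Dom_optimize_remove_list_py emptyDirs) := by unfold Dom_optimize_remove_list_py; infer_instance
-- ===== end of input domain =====

-- B replaces A's O(n²) pairwise startswith scan by a per-string hash lookup of its own proper
-- prefixes in the set; both return a SET (compared as a finite set), and the removal result is
-- independent of Python's set-iteration order, so iterating in first-occurrence order is exact.

-- ===== PORT A =====
def optimize_remove_list_py (emptyDirs : List String) : List String :=
  -- emptyDirs = set(emptyDirs); tempColl = emptyDirs.copy()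
  let s : PySem.Set String := PySem.Set.ofList emptyDirs
  -- the double loop only REMOVES elements (remove of an absent element is caught and skipped),
  -- so the resulting set does not depend on the set-iteration order; we enumerate in ofList order
  (PySem.List.enumerate s 0).foldl (fun tempColl p =>
    (PySem.List.enumerate s 0).foldl (fun tempColl q =>
      if q.1 == p.1 then tempColl
      else if PySem.Str.startswith q.2 p.2 then
        match PySem.Set.remove? tempColl q.2 with
        | some r => r          -- tempColl.remove(target)
        | none => tempColl     -- except KeyError: continue
      else tempColl) tempColl) s

-- ===== PORT B =====
def optimize_remove_list_py_alt (emptyDirs : List String) : List String :=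
  let uniq : PySem.Set String := PySem.Set.ofList emptyDirs
  -- {t for t in uniq if not any(t[:k] in uniq for k in range(len(t)))}
  List.filter (fun t =>
    !((PySem.List.pyRange 0 (PySem.Str.len t) 1).any
        (fun k => PySem.Set.contains uniq (PySem.Str.slice t none (some k))))) uniq

-- ===== PRECONDITION & SPEC =====
def Spec_optimize_remove_list_py (emptyDirs : List String) (out : List String) : Prop := out = optimize_remove_list_py_alt emptyDirs
instance (emptyDirs : List String) (out : List String) : Decidable (Spec_optimize_remove_list_py emptyDirs out) := by unfold Spec_optimize_remove_list_py; infer_instance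

-- ===== CLAIM (what is proved, stated in full; the proofs are below) =====
def Claim_equal_optimize_remove_list_py : Prop := ∀ (emptyDirs : List String), Dom_optimize_remove_list_py emptyDirs → Spec_optimize_remove_list_py emptyDirs (optimize_remove_list_py emptyDirs)

-- ===== LEMMAS AND PROOFS =====

-- the condition under which A's inner-loop body removes the element a from tempColl
def condA (p q : ℤ × String) (a : String) : Bool :=
  !(q.1 == p.1) && (PySem.Str.startswith q.2 p.2 && (a == q.2))

-- a fold whose every step is a filter is the filter by the conjunction
theorem foldl_step_filter {α β : Type} (f : List α → β → List α) (h : β → α → Bool)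
    (hf : ∀ (t : List α) (e : β), f t e = t.filter (fun a => h e a)) :
    ∀ (L : List β) (t : List α), L.foldl f t = t.filter (fun a => L.all (fun e => h e a)) := by
  intro L
  induction L with
  | nil => intro t; simp
  | cons e L ih =>
    intro t
    rw [List.foldl_cons, hf, ih, List.filter_filter]
    refine List.filter_congr (fun a _ => ?_)
    simp [Bool.and_comm]

-- A's inner-loop body is a filter
theorem stepA_eq (p q : ℤ × String) (t : List String) :
    (if q.1 == p.1 then t
     else if PySem.Str.startswith q.2 p.2 then
       match PySem.Set.remove? t q.2 with
       | some r => r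
       | none => t
     else t) = t.filter (fun a => !condA p q a) := by
  by_cases h1 : q.1 == p.1
  · rw [if_pos h1, eq_comm, List.filter_eq_self]
    intro a _
    simp [condA, h1]
  · by_cases h2 : PySem.Str.startswith q.2 p.2
    · by_cases hm : q.2 ∈ t
      · have h2' : PySem.Chars.startswith q.2.toList p.2.toList = true := by
          rw [← PySem.Str.startswith_eq]; exact h2
        rw [if_neg h1, if_pos h2, PySem.Set.remove?_of_mem hm]
        simp only [PySem.Set.discard]
        refine List.filter_congr (fun a _ => ?_)
        simp [condA, h1, h2']
      · rw [if_neg h1, if_pos h2, (PySem.Set.remove?_eq_none_iff t q.2).mpr hm]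
        rw [eq_comm, List.filter_eq_self]
        intro a ha
        simp only [condA, h1, h2, Bool.not_eq_true', Bool.and_eq_false_iff]
        right; right
        exact beq_eq_false_iff_ne.mpr (fun hEq => hm (hEq ▸ ha))
    · have h2' : PySem.Chars.startswith q.2.toList p.2.toList = false := by
        rw [← PySem.Str.startswith_eq]; exact Bool.eq_false_iff.mpr h2
      rw [if_neg h1, if_neg h2, eq_comm, List.filter_eq_self]
      intro a _
      simp [condA, h2']

-- characterization of A's double removal loop as one filter
theorem portA_eq (xs : List String) :
    optimize_remove_list_py xs =
      (PySem.Set.ofList xs).filter (fun a =>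
        (PySem.List.enumerate (PySem.Set.ofList xs) 0).all (fun p =>
          (PySem.List.enumerate (PySem.Set.ofList xs) 0).all (fun q => !condA p q a))) := by
  unfold optimize_remove_list_py
  exact foldl_step_filter _
    (fun p a => (PySem.List.enumerate (PySem.Set.ofList xs) 0).all (fun q => !condA p q a))
    (fun t p => foldl_step_filter _ (fun q a => !condA p q a) (fun t q => stepA_eq p q t) _ t)
    _ _

-- replace the index pair (z ≠ i) by the element pair (y ≠ a), using Nodup
theorem enum_pair_iff (l : List String) (hnd : l.Nodup) (a : String) (ha : a ∈ l) :
    (∃ p ∈ PySem.List.enumerate l 0, ∃ q ∈ PySem.List.enumerate l 0,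
        condA p q a = true)
  ↔ ∃ y ∈ l, y ≠ a ∧ PySem.Str.startswith a y = true := by
  constructor
  · rintro ⟨p, hp, q, hq, hc⟩
    rw [PySem.List.mem_enumerate_iff] at hp hq
    obtain ⟨i, hi, rfl⟩ := hp
    obtain ⟨j, hj, rfl⟩ := hq
    simp only [condA, Bool.and_eq_true, Bool.not_eq_true', beq_iff_eq,
      beq_eq_false_iff_ne, ne_eq] at hc
    obtain ⟨hne, hsw, rfl⟩ := hc
    refine ⟨l[i], List.getElem_mem _, ?_, hsw⟩
    intro hEq
    have hij : i = j := hnd.getElem_inj_iff.mp hEq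
    exact hne (by rw [hij])
  · rintro ⟨y, hy, hne, hsw⟩
    obtain ⟨i, hi, hyi⟩ := List.mem_iff_getElem.mp hy
    obtain ⟨j, hj, haj⟩ := List.mem_iff_getElem.mp ha
    have hij : i ≠ j := by
      intro h
      apply hne
      rw [← hyi, ← haj]
      simp [h]
    refine ⟨(0 + (i : ℤ), l[i]), ?_, (0 + (j : ℤ), l[j]), ?_, ?_⟩
    · exact (PySem.List.mem_enumerate_iff _ _ _).mpr ⟨i, hi, rfl⟩
    · exact (PySem.List.mem_enumerate_iff _ _ _).mpr ⟨j, hj, rfl⟩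
    · simp only [condA, Bool.and_eq_true, Bool.not_eq_true', beq_eq_false_iff_ne,
        ne_eq, beq_iff_eq]
      refine ⟨fun h => hij (by omega), ?_, haj.symm⟩
      have h1 : l[j] = a := haj
      have h2 : l[i] = y := hyi
      rw [h1, h2]
      exact hsw

-- helper: t[:n] for a natural n is the take
theorem slice_toList (a : String) (n : ℕ) :
    (PySem.Str.slice a none (some (n : ℤ))).toList = a.toList.take n := by
  rw [PySem.Str.toList_slice, PySem.Chars.slice_eq_listSlice,
      PySem.List.slice_to a.toList (by positivity)]
  simp

-- a string has a smaller set element it extends iff one of its proper prefixes is in the set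
theorem prefix_slice_iff (s : List String) (a : String) :
    (∃ y ∈ s, y ≠ a ∧ PySem.Str.startswith a y = true)
  ↔ ∃ k ∈ PySem.List.pyRange 0 (PySem.Str.len a) 1,
      PySem.Str.slice a none (some k) ∈ s := by
  constructor
  · rintro ⟨y, hy, hne, hsw⟩
    rw [PySem.Str.startswith_eq] at hsw
    have hpre : y.toList <+: a.toList := (PySem.Chars.startswith_iff _ _).mp hsw
    have htake : y.toList = a.toList.take y.toList.length := List.prefix_iff_eq_take.mp hpre
    have hlt : y.toList.length < a.toList.length := by
      rcases lt_or_eq_of_le hpre.length_le with h | h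
      · exact h
      · exfalso
        apply hne
        apply String.toList_inj.mp
        rw [htake, h, List.take_length]
    refine ⟨(y.toList.length : ℤ), ?_, ?_⟩
    · rw [PySem.List.mem_pyRange_one, PySem.Str.len_eq]
      exact ⟨by positivity, by exact_mod_cast hlt⟩
    · have hsl : PySem.Str.slice a none (some (y.toList.length : ℤ)) = y := by
        apply String.toList_inj.mp
        rw [slice_toList]
        exact htake.symm
      rw [hsl]
      exact hy
  · rintro ⟨k, hk, hmem⟩
    rw [PySem.List.mem_pyRange_one, PySem.Str.len_eq] at hk
    obtain ⟨hk0, hklt⟩ := hk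
    have hkn : ((k.toNat : ℤ)) = k := Int.toNat_of_nonneg hk0
    have hnlt : k.toNat < a.toList.length := by omega
    have h1 : (PySem.Str.slice a none (some k)).toList = a.toList.take k.toNat := by
      rw [← hkn, slice_toList]
      simp
      omega
    refine ⟨PySem.Str.slice a none (some k), hmem, ?_, ?_⟩
    · intro hEq
      rw [hEq] at h1
      have := congrArg List.length h1
      rw [List.length_take] at this
      omega
    · rw [PySem.Str.startswith_eq, PySem.Chars.startswith_iff, h1]
      exact List.take_prefix _ _

-- ===== VERDICT (by name: the statement is the Claim_ definition above) =====
theorem optimize_remove_list_py_spec : Claim_equal_optimize_remove_list_py := by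
  intro xs _
  unfold Spec_optimize_remove_list_py
  rw [portA_eq]
  unfold optimize_remove_list_py_alt
  refine (List.filter_congr (fun a ha => ?_)).symm
  have key : (∃ p ∈ PySem.List.enumerate (PySem.Set.ofList xs) 0,
                ∃ q ∈ PySem.List.enumerate (PySem.Set.ofList xs) 0, condA p q a = true)
      ↔ ∃ k ∈ PySem.List.pyRange 0 (PySem.Str.len a) 1,
          PySem.Set.contains (PySem.Set.ofList xs) (PySem.Str.slice a none (some k)) = true := by
    rw [enum_pair_iff (PySem.Set.ofList xs) (PySem.Set.nodup_ofList xs) a ha,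
        prefix_slice_iff]
    exact exists_congr fun k => and_congr_right fun _ =>
      (PySem.Set.contains_iff _ _).symm
  rw [Bool.eq_iff_iff]
  constructor
  · intro hnot
    rw [Bool.not_eq_true', List.any_eq_false] at hnot
    rw [List.all_eq_true]
    intro p hp
    rw [List.all_eq_true]
    intro q hq
    by_contra hc
    have hcq : condA p q a = true := by simpa using hc
    obtain ⟨k, hk, hck⟩ := key.mp ⟨p, hp, q, hq, hcq⟩
    exact absurd hck (by simpa using hnot k hk)
  · intro hall
    rw [Bool.not_eq_true', List.any_eq_false]
    intro k hk
    by_contra hc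
    have hc' : PySem.Set.contains (PySem.Set.ofList xs)
        (PySem.Str.slice a none (some k)) = true := by simpa using hc
    obtain ⟨p, hp, q, hq, hcq⟩ := key.mpr ⟨k, hk, hc'⟩
    have h3 := List.all_eq_true.mp (List.all_eq_true.mp hall p hp) q hq
    simp [hcq] at h3
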